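-- pv_equiv track=rewrite | github.com/gulang2019/SLOServe | SLOsServe/profiler/make_regression_seed_batches.py | infer_batch_type
-- ===== SOURCE A (Python) =====
-- def infer_batch_type(requests: list[dict[str, int]]) -> str:
--     has_prefill = any(r["query_len"] > 1 for r in requests)
--     has_decode = any(r["query_len"] == 1 for r in requests)
--     if has_prefill and not has_decode:
--         return "prefill"
--     if has_decode and not has_prefill:
--         return "decode"
--     return "mixed"
-- ===== SOURCE B (Python) =====
-- def infer_batch_type(requests: list[dict[str, int]]) -> str:
--     kinds = {("prefill" if q > 1 else "decode" if q == 1 else "other")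
--              for q in (r["query_len"] for r in requests)}
--     kinds.discard("other")
--     if len(kinds) == 1:
--         return kinds.pop()
--     return "mixed"
-- ===== Notes on version B (the rewrite author's own statement) =====
-- stated objective: alternative
-- what changed: B classifies every request into a label ('prefill'/'decode'/'other') with a set comprehension, discards 'other', and decides by the cardinality of the resulting label set (singleton -> that label, else 'mixed'), instead of A's two boolean any() scans with branch logic.
-- outside the precondition, e.g. on infer_batch_type([{'query_len': 2}, {'query_len': 1}, {}]): A returns 'mixed', B raises KeyError
import Mathlib
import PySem

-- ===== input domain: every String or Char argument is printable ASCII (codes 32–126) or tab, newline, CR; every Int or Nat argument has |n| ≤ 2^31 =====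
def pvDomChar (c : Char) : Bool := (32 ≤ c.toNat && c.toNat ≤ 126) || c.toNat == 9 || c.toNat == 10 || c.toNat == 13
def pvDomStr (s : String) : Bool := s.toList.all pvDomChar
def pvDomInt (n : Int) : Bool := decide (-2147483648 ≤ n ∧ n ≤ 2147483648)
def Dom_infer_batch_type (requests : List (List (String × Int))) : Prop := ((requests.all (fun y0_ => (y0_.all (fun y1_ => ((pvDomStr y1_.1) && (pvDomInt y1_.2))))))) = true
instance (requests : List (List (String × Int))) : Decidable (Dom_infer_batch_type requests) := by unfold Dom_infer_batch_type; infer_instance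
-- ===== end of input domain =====

-- ===== PORT A =====
-- B builds the set of per-request labels and decides by its cardinality, instead of A's two any() scans; equal return value on Pre_.
def pvQlen (r : List (String × Int)) : Option Int := (PySem.Dict.mk r).get? "query_len"

def infer_batch_type (requests : List (List (String × Int))) : String :=
  let has_prefill := requests.any (fun r => decide ((pvQlen r).getD 0 > 1))
  let has_decode := requests.any (fun r => decide ((pvQlen r).getD 0 = 1))
  if has_prefill && !has_decode then "prefill"
  else if has_decode && !has_prefill then "decode"
  else "mixed"

-- ===== PORT B =====
def pvLabel (q : Int) : String :=
  if q > 1 then "prefill" else if q = 1 then "decode" else "other"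

def infer_batch_type_alt (requests : List (List (String × Int))) : String :=
  let kinds : PySem.Set String :=
    PySem.Set.ofList (requests.map (fun r => pvLabel ((pvQlen r).getD 0)))
  let kinds := PySem.Set.discard kinds "other"
  -- kinds.pop() on a singleton set is its unique element: ported as headD
  if kinds.length = 1 then kinds.headD "mixed" else "mixed"

-- ===== PRECONDITION & SPEC =====
-- Pre_ excludes the inputs on which either Python raises KeyError (a request without the
-- "query_len" key): A raises there unless both any() scans short-circuit first, and B
-- (which reads every request) always raises there, so those inputs are outside the claim.
def Pre_infer_batch_type (requests : List (List (String × Int))) : Prop :=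
  ∀ r ∈ requests, (pvQlen r).isSome
instance (requests : List (List (String × Int))) : Decidable (Pre_infer_batch_type requests) := by unfold Pre_infer_batch_type; infer_instance
def pvWitness_infer_batch_type : (List (List (String × Int))) := [[("query_len", 2)], [("query_len", 1)]]
def Spec_infer_batch_type (requests : List (List (String × Int))) (out : String) : Prop := out = infer_batch_type_alt requests
instance (requests : List (List (String × Int))) (out : String) : Decidable (Spec_infer_batch_type requests out) := by unfold Spec_infer_batch_type; infer_instance

-- ===== CLAIM =====
def Claim_equal_infer_batch_type : Prop := ∀ (requests : List (List (String × Int))), Dom_infer_batch_type requests → Pre_infer_batch_type requests → Spec_infer_batch_type requests (infer_batch_type requests)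

-- ===== LEMMAS AND PROOFS =====
theorem pv_all_eq_singleton {α : Type} (s : List α) (a : α) (hne : s ≠ [])
    (hall : ∀ x ∈ s, x = a) : s.Nodup → s = [a] := by
  match s with
  | [] => exact absurd rfl hne
  | x :: t =>
    intro hnd
    have hx : x = a := hall x (List.mem_cons_self)
    subst hx
    have ht : t = [] := by
      rw [List.eq_nil_iff_forall_not_mem]
      intro y hy
      have : y = x := hall y (List.mem_cons_of_mem _ hy)
      subst this
      exact (List.nodup_cons.mp hnd).1 hy
    rw [ht]

-- B's filtered label set, characterised by the two flags of A.
theorem infer_batch_type_eq (requests : List (List (String × Int))) :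
    infer_batch_type requests = infer_batch_type_alt requests := by
  simp only [infer_batch_type, infer_batch_type_alt]
  set hp := requests.any (fun r => decide ((pvQlen r).getD 0 > 1)) with hhp
  set hd := requests.any (fun r => decide ((pvQlen r).getD 0 = 1)) with hhd
  set m := requests.map (fun r => pvLabel ((pvQlen r).getD 0)) with hm
  set s := PySem.Set.discard (PySem.Set.ofList m) "other" with hs
  have hmem : ∀ x, x ∈ s ↔ x ∈ m ∧ x ≠ "other" := by
    intro x
    rw [hs, PySem.Set.mem_discard, PySem.Set.mem_ofList]
  have hnd : s.Nodup := by
    rw [hs]; exact PySem.Set.nodup_discard _ _ (PySem.Set.nodup_ofList _)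
  have hsub : ∀ x ∈ s, x = "prefill" ∨ x = "decode" := by
    intro x hx
    obtain ⟨hxm, hxo⟩ := (hmem x).mp hx
    rw [hm, List.mem_map] at hxm
    obtain ⟨r, _, hr⟩ := hxm
    unfold pvLabel at hr
    split_ifs at hr with h1 h2
    · exact Or.inl hr.symm
    · exact Or.inr hr.symm
    · exact absurd hr.symm hxo
  have hp_iff : "prefill" ∈ s ↔ hp = true := by
    rw [hmem, hhp, List.any_eq_true, hm]
    constructor
    · rintro ⟨hms, -⟩
      rw [List.mem_map] at hms
      obtain ⟨r, hrm, hr⟩ := hms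
      refine ⟨r, hrm, ?_⟩
      unfold pvLabel at hr
      split_ifs at hr with h1 h2 <;> simp_all
    · rintro ⟨r, hrm, hq⟩
      refine ⟨List.mem_map.mpr ⟨r, hrm, ?_⟩, by decide⟩
      simp only [decide_eq_true_eq] at hq
      unfold pvLabel
      rw [if_pos hq]
  have hd_iff : "decode" ∈ s ↔ hd = true := by
    rw [hmem, hhd, List.any_eq_true, hm]
    constructor
    · rintro ⟨hms, -⟩
      rw [List.mem_map] at hms
      obtain ⟨r, hrm, hr⟩ := hms
      refine ⟨r, hrm, ?_⟩
      unfold pvLabel at hr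
      split_ifs at hr with h1 h2 <;> simp_all
    · rintro ⟨r, hrm, hq⟩
      refine ⟨List.mem_map.mpr ⟨r, hrm, ?_⟩, by decide⟩
      simp only [decide_eq_true_eq] at hq
      unfold pvLabel
      rw [if_neg (by omega), if_pos hq]
  cases hpc : hp <;> cases hdc : hd
  · -- neither: s = []
    have : s = [] := by
      rw [List.eq_nil_iff_forall_not_mem]
      intro x hx
      rcases hsub x hx with h | h <;> subst h
      · rw [hp_iff] at hx; simp [hx] at hpc
      · rw [hd_iff] at hx; simp [hx] at hdc
    simp [this]
  · -- decode only: s = ["decode"]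
    have : s = ["decode"] := by
      refine pv_all_eq_singleton s _ ?_ ?_ hnd
      · intro h; rw [h] at hd_iff; simp [hdc] at hd_iff
      · intro x hx
        rcases hsub x hx with h | h
        · subst h; rw [hp_iff] at hx; simp [hx] at hpc
        · exact h
    simp [this]
  · -- prefill only: s = ["prefill"]
    have : s = ["prefill"] := by
      refine pv_all_eq_singleton s _ ?_ ?_ hnd
      · intro h; rw [h] at hp_iff; simp [hpc] at hp_iff
      · intro x hx
        rcases hsub x hx with h | h
        · exact h
        · subst h; rw [hd_iff] at hx; simp [hx] at hdc
    simp [this]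
  · -- both: length ≠ 1
    have hlen : s.length ≠ 1 := by
      intro h
      obtain ⟨x, hx⟩ := List.length_eq_one_iff.mp h
      have h1 : "prefill" ∈ s := hp_iff.mpr hpc
      have h2 : "decode" ∈ s := hd_iff.mpr hdc
      rw [hx] at h1 h2
      simp at h1 h2
      rw [← h1] at h2
      exact absurd h2 (by decide)
    simp [hlen]

-- ===== VERDICT =====
theorem infer_batch_type_spec : Claim_equal_infer_batch_type := by
  intro requests _ _
  exact infer_batch_type_eq requests
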